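-- pv_equiv track=rewrite | github.com/Kinosaur/algorithm_design | week0/onlineJudge01.py | find_min_cost
-- ===== SOURCE A (Python) =====
-- def find_min_cost(max_packets, target_kg, prices):
--     # dp[w] = min cost to buy exactly w kg, -1 means impossible
--     dp = [-1] * (target_kg + 1)
--     dp[0] = 0
--
--     # try using 1 packet, then 2 packets, up to max_packets
--     for num_packets in range(1, max_packets + 1):
--         new_dp = dp[:]
--
--         for kg in range(1, target_kg + 1):
--             # try buying each available packet size
--             for packet_kg in range(1, kg + 1):
--                 packet_cost = prices[packet_kg - 1]
--
--                 if packet_cost != -1: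
--                     remaining = kg - packet_kg
--
--                     if dp[remaining] != -1:
--                         total_cost = dp[remaining] + packet_cost
--
--                         if new_dp[kg] == -1:
--                             new_dp[kg] = total_cost
--                         else:
--                             new_dp[kg] = min(new_dp[kg], total_cost)
--
--         dp = new_dp
--
--     return dp[target_kg]
-- ===== SOURCE B (Python) =====
-- def find_min_cost(max_packets, target_kg, prices):
--     # Top-down memoized recursion instead of the bottom-up layered table:
--     # cost(w, k) = best cost for exactly w kg using at most k packets, with the
--     # problem's own -1 sentinel for "impossible" (in prices and in results).
--     memo = {}
--
--     def cost(w, k):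
--         if w == 0:
--             return 0
--         if k <= 0:
--             return -1
--         key = (w, k)
--         if key in memo:
--             return memo[key]
--         best = cost(w, k - 1)
--         for p in range(1, w + 1):
--             price = prices[p - 1]
--             if price != -1:
--                 sub = cost(w - p, k - 1)
--                 if sub != -1:
--                     t = sub + price
--                     best = t if best == -1 else min(best, t)
--         memo[key] = best
--         return best
--
--     return cost(target_kg, max_packets)
-- ===== Notes on version B (the rewrite author's own statement) =====
-- stated objective: alternative
-- what changed: Replaced the bottom-up triple-loop layered DP table with a top-down memoized recursion cost(w,k) over (weight, packets-left), computing cells lazily via a dict memo instead of building and copying whole rows.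
import Mathlib
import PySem

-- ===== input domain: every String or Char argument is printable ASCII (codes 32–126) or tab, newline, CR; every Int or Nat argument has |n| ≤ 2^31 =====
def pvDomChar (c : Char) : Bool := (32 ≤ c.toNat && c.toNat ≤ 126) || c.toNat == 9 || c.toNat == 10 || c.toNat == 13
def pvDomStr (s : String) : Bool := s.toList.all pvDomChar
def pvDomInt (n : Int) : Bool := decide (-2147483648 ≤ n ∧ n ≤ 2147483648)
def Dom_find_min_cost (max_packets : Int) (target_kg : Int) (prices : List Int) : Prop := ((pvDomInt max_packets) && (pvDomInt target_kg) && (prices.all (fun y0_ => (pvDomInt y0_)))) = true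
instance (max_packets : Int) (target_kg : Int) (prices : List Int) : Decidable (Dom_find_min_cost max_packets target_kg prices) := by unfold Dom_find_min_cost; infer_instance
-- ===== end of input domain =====

-- B replaces the bottom-up layered DP table with a top-down memoized recursion
-- cost(w, k) over (weight, packets-left) (alternative decomposition; same cost;
-- equality of the return value is proved on Pre_).

-- ===== PORT A =====
-- innermost loop body: 'for packet_kg in range(1, kg + 1): ...'
def aInner (prices dp : List Int) (kg : Int) (new_dp : List Int) (packet_kg : Int) : List Int :=
  let packet_cost := PySem.List.pyGetD prices (packet_kg - 1) 0   -- prices[packet_kg-1]; Pre_ keeps it in range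
  if packet_cost ≠ -1 then
    let remaining := kg - packet_kg
    let prevv := PySem.List.pyGetD dp remaining (-1)              -- dp[remaining], 0 ≤ remaining ≤ kg < len dp
    if prevv ≠ -1 then
      let total_cost := prevv + packet_cost
      if PySem.List.pyGetD new_dp kg (-1) = -1 then
        PySem.List.pySetD new_dp kg total_cost                    -- new_dp[kg] = total_cost
      else
        PySem.List.pySetD new_dp kg (min (PySem.List.pyGetD new_dp kg (-1)) total_cost)
    else new_dp
  else new_dp

-- 'for kg in range(1, target_kg + 1): ...'
def aKg (prices dp : List Int) (new_dp : List Int) (kg : Int) : List Int :=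
  (PySem.List.pyRange 1 (kg + 1) 1).foldl (aInner prices dp kg) new_dp

-- one iteration of 'for num_packets in range(1, max_packets + 1)': new_dp = dp[:] then the kg loop
def aRound (prices : List Int) (target_kg : Int) (dp : List Int) : List Int :=
  (PySem.List.pyRange 1 (target_kg + 1) 1).foldl (aKg prices dp) dp

def find_min_cost (max_packets : Int) (target_kg : Int) (prices : List Int) : Int :=
  -- dp = [-1] * (target_kg + 1); dp[0] = 0; the num_packets loop; return dp[target_kg]
  PySem.List.pyGetD
    ((PySem.List.pyRange 1 (max_packets + 1) 1).foldl
      (fun dp _num_packets => aRound prices target_kg dp)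
      (PySem.List.pySetD (List.replicate (target_kg + 1).toNat (-1)) 0 0))
    target_kg (-1)

-- ===== PORT B =====
-- 'def cost(w, k)': the memoized recursion, transcribed as structural recursion on the
-- packets-left counter k (the dict memo is a caching device; the computed function is
-- this recursion). Fuel 0 is Python's 'k <= 0' base case.
def bCost (prices : List Int) : Nat → Int → Int
  | 0, w => if w = 0 then 0 else -1                               -- w == 0 → 0; k <= 0 → -1
  | k + 1, w =>
    if w = 0 then 0
    else
      -- best = cost(w, k-1); for p in range(1, w+1): ...
      (PySem.List.pyRange 1 (w + 1) 1).foldl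
        (fun best p =>
          let price := PySem.List.pyGetD prices (p - 1) 0         -- prices[p-1]; Pre_ keeps it in range
          if price ≠ -1 then
            let sub := bCost prices k (w - p)                     -- cost(w-p, k-1)
            if sub ≠ -1 then
              let t := sub + price
              if best = -1 then t else min best t
            else best
          else best)
        (bCost prices k w)

def find_min_cost_alt (max_packets : Int) (target_kg : Int) (prices : List Int) : Int :=
  -- return cost(target_kg, max_packets)
  bCost prices max_packets.toNat target_kg

-- ===== PRECONDITION & SPEC =====
-- Pre_ excludes exactly the inputs where the Python A raises IndexError: a negative target
-- (dp[0] = 0 on a too-short list) and, when the packet loops run at all (max_packets ≥ 1),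
-- a prices list shorter than target_kg (prices[packet_kg - 1] out of range).
def Pre_find_min_cost (max_packets : Int) (target_kg : Int) (prices : List Int) : Prop :=
  0 ≤ target_kg ∧ (1 ≤ max_packets → target_kg ≤ (prices.length : Int))
instance (max_packets : Int) (target_kg : Int) (prices : List Int) : Decidable (Pre_find_min_cost max_packets target_kg prices) := by unfold Pre_find_min_cost; infer_instance

def pvWitness_find_min_cost : Int × Int × List Int := (2, 3, [2, -1, 5])

def Spec_find_min_cost (max_packets : Int) (target_kg : Int) (prices : List Int) (out : Int) : Prop := out = find_min_cost_alt max_packets target_kg prices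
instance (max_packets : Int) (target_kg : Int) (prices : List Int) (out : Int) : Decidable (Spec_find_min_cost max_packets target_kg prices out) := by unfold Spec_find_min_cost; infer_instance

-- ===== CLAIM (what is proved, stated in full; the proofs are below) =====
def Claim_equal_find_min_cost : Prop := ∀ (max_packets : Int) (target_kg : Int) (prices : List Int), Dom_find_min_cost max_packets target_kg prices → Pre_find_min_cost max_packets target_kg prices → Spec_find_min_cost max_packets target_kg prices (find_min_cost max_packets target_kg prices)

-- ===== LEMMAS AND PROOFS =====

-- Scalar form of one candidate update for cell w (packet size p) over the previous row dp.
def cstep (prices dp : List Int) (w : Int) (acc : Int) (p : Int) : Int :=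
  let price := PySem.List.pyGetD prices (p - 1) 0
  if price = -1 then acc
  else
    let prevv := PySem.List.pyGetD dp (w - p) (-1)
    if prevv ≠ -1 then (if acc = -1 then prevv + price else min acc (prevv + price)) else acc

-- value of cell w after folding candidates p = 1..b over the previous row dp
def pcell (prices dp : List Int) (w b : Int) : Int :=
  (PySem.List.pyRange 1 (b + 1) 1).foldl (cstep prices dp w) (PySem.List.pyGetD dp w (-1))

-- initial row dp = [-1]*(t+1); dp[0] = 0, and the bottom-up iteration of A's rounds
def dp0 (t : Int) : List Int := PySem.List.pySetD (List.replicate (t + 1).toNat (-1)) 0 0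

def dpIter (prices : List Int) (t : Int) : Nat → List Int
  | 0 => dp0 t
  | k + 1 => aRound prices t (dpIter prices t k)

lemma set_getElem_self (l : List Int) (i : Nat) (h : i < l.length) : l.set i l[i] = l := by
  apply List.ext_getElem (by simp)
  intro j h1 h2
  simp only [List.getElem_set]
  split
  · next heq => subst heq; rfl
  · rfl

-- one aInner step on a row already written at kg is one cstep on the written value
lemma aInner_step (prices dp : List Int) (kg : Int) (h0 : 0 ≤ kg) (new : List Int)
    (hlen : kg < (new.length : Int)) (acc p : Int) :
    aInner prices dp kg (PySem.List.pySetD new kg acc) p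
      = PySem.List.pySetD new kg (cstep prices dp kg acc p) := by
  have hkg : ((kg.toNat : Nat) : Int) = kg := Int.toNat_of_nonneg h0
  have hlt : kg.toNat < new.length := by omega
  have hread : PySem.List.pyGetD (PySem.List.pySetD new kg acc) kg (-1) = acc := by
    conv_lhs => rw [← hkg]
    rw [PySem.List.pyGetD_pySetD_natCast new kg.toNat kg.toNat acc (-1) hlt]
    simp
  have hsetset : ∀ v w : Int,
      PySem.List.pySetD (PySem.List.pySetD new kg v) kg w = PySem.List.pySetD new kg w := by
    intro v w
    rw [PySem.List.pySetD_of_nonneg _ _ h0, PySem.List.pySetD_of_nonneg _ _ h0,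
        PySem.List.pySetD_of_nonneg _ _ h0, List.set_set]
  simp only [aInner, cstep, hread]
  split_ifs <;> first | rfl | exact hsetset _ _ | tauto

lemma aInner_fold (prices dp : List Int) (kg : Int) (h0 : 0 ≤ kg) (b : Nat) :
    ∀ (new : List Int), kg < (new.length : Int) →
      (PySem.List.pyRange 1 ((b : Int) + 1) 1).foldl (aInner prices dp kg) new
        = PySem.List.pySetD new kg
            ((PySem.List.pyRange 1 ((b : Int) + 1) 1).foldl (cstep prices dp kg)
              (PySem.List.pyGetD new kg (-1))) := by
  induction b with
  | zero =>
    intro new hlen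
    simp only [Nat.cast_zero, zero_add]
    rw [PySem.List.pyRange_one_eq_nil le_rfl]
    simp only [List.foldl_nil]
    rw [PySem.List.pySetD_of_nonneg _ _ h0,
        PySem.List.pyGetD_eq_getElem new (-1) h0 hlen]
    exact (set_getElem_self new kg.toNat (by omega)).symm
  | succ b ih =>
    intro new hlen
    rw [show (((b + 1 : Nat)) : Int) + 1 = ((b : Int) + 1) + 1 from by push_cast; ring,
        PySem.List.pyRange_one_succ_right (show (1 : Int) ≤ (b : Int) + 1 from by omega),
        List.foldl_append, List.foldl_append]
    rw [ih new hlen]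
    simp only [List.foldl_cons, List.foldl_nil]
    exact aInner_step prices dp kg h0 new hlen _ _

lemma aRound_pt (prices dp : List Int) (t : Int) (_ht : 0 ≤ t) (hdp : (dp.length : Int) = t + 1) :
    ∀ (b : Nat), (b : Int) ≤ t →
      ((PySem.List.pyRange 1 ((b : Int) + 1) 1).foldl (aKg prices dp) dp).length = dp.length ∧
      ∀ m : Nat,
        PySem.List.pyGetD ((PySem.List.pyRange 1 ((b : Int) + 1) 1).foldl (aKg prices dp) dp) (m : Int) (-1)
          = if 1 ≤ m ∧ (m : Int) ≤ (b : Int) then pcell prices dp (m : Int) (m : Int)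
            else PySem.List.pyGetD dp (m : Int) (-1) := by
  intro b
  induction b with
  | zero =>
    intro _
    simp only [Nat.cast_zero, zero_add]
    rw [PySem.List.pyRange_one_eq_nil le_rfl]
    simp only [List.foldl_nil]
    constructor
    · trivial
    · intro m; rw [if_neg (by omega)]
  | succ b ih =>
    intro hb
    have hb' : (b : Int) ≤ t := by push_cast at hb ⊢; omega
    obtain ⟨ihlen, ihpt⟩ := ih hb'
    rw [show (((b + 1 : Nat)) : Int) + 1 = ((b : Int) + 1) + 1 from by push_cast; ring,
        PySem.List.pyRange_one_succ_right (show (1 : Int) ≤ (b : Int) + 1 from by omega),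
        List.foldl_append]
    set F := (PySem.List.pyRange 1 ((b : Int) + 1) 1).foldl (aKg prices dp) dp with hF
    simp only [List.foldl_cons, List.foldl_nil]
    have hkglt : ((b : Int) + 1) < (F.length : Int) := by
      rw [ihlen]; push_cast at hb ⊢; omega
    have hstart : PySem.List.pyGetD F ((b : Int) + 1) (-1) = PySem.List.pyGetD dp ((b : Int) + 1) (-1) := by
      have h := ihpt (b + 1)
      rw [if_neg (by omega)] at h
      rw [show (((b + 1 : Nat)) : Int) = (b : Int) + 1 from by push_cast; ring] at h
      exact h
    simp only [aKg]
    rw [show ((b : Int) + 1) + 1 = (((b + 1 : Nat)) : Int) + 1 from by push_cast; ring,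
        aInner_fold prices dp ((b : Int) + 1) (by omega) (b + 1) F hkglt, hstart]
    have hval : (PySem.List.pyRange 1 (((b + 1 : Nat) : Int) + 1) 1).foldl
        (cstep prices dp ((b : Int) + 1)) (PySem.List.pyGetD dp ((b : Int) + 1) (-1))
        = pcell prices dp ((b : Int) + 1) ((b : Int) + 1) := by
      rw [pcell, show (((b + 1 : Nat)) : Int) + 1 = ((b : Int) + 1) + 1 from by push_cast; ring]
    rw [hval]
    constructor
    · rw [PySem.List.length_pySetD, ihlen]
    · intro m
      have hbn : (b : Int) + 1 = (((b + 1 : Nat)) : Int) := by push_cast; ring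
      have hltn : b + 1 < F.length := by omega
      conv_lhs => rw [hbn]
      rw [PySem.List.pyGetD_pySetD_natCast F (b + 1) m _ (-1) hltn]
      by_cases hm : m = b + 1
      · subst hm
        rw [if_pos rfl, if_pos (by constructor <;> omega)]
      · rw [if_neg hm, ihpt m]
        by_cases hcond : 1 ≤ m ∧ (m : Int) ≤ (b : Int)
        · rw [if_pos hcond, if_pos (by omega)]
        · rw [if_neg hcond, if_neg (by omega)]

lemma aRound_spec (prices dp : List Int) (t : Int) (ht : 0 ≤ t) (hdp : (dp.length : Int) = t + 1) :
    (aRound prices t dp).length = dp.length ∧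
    ∀ m : Nat, PySem.List.pyGetD (aRound prices t dp) (m : Int) (-1)
      = if 1 ≤ m ∧ (m : Int) ≤ t then pcell prices dp (m : Int) (m : Int)
        else PySem.List.pyGetD dp (m : Int) (-1) := by
  have h := aRound_pt prices dp t ht hdp t.toNat (le_of_eq (Int.toNat_of_nonneg ht))
  rw [Int.toNat_of_nonneg ht] at h
  simpa only [aRound] using h

-- B's fold step agrees with cstep once the recursive value equals the table read
lemma bstep_eq_cstep (prices dp : List Int) (k : Nat) (w : Int) (acc p : Int)
    (hsub : bCost prices k (w - p) = PySem.List.pyGetD dp (w - p) (-1)) :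
    (let price := PySem.List.pyGetD prices (p - 1) 0
     if price ≠ -1 then
       let sub := bCost prices k (w - p)
       if sub ≠ -1 then
         let t := sub + price
         if acc = -1 then t else min acc t
       else acc
     else acc) = cstep prices dp w acc p := by
  simp only [cstep, hsub]
  split_ifs <;> first | rfl | tauto

-- the central invariant: row k of A's bottom-up table = B's recursion at fuel k
lemma dpIter_eq_bCost (prices : List Int) (t : Int) (ht : 0 ≤ t) : ∀ k : Nat,
    ((dpIter prices t k).length : Int) = t + 1 ∧
    ∀ w : Nat, (w : Int) ≤ t →
      PySem.List.pyGetD (dpIter prices t k) (w : Int) (-1) = bCost prices k (w : Int) := by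
  intro k
  induction k with
  | zero =>
    constructor
    · simp only [dpIter, dp0, PySem.List.length_pySetD, List.length_replicate]
      omega
    · intro w hw
      simp only [dpIter, dp0, bCost]
      have hlt : 0 < (List.replicate (t + 1).toNat (-1 : Int)).length := by
        simp only [List.length_replicate]; omega
      have hkey := PySem.List.pyGetD_pySetD_natCast (List.replicate (t + 1).toNat (-1)) 0 w 0 (-1) hlt
      simp only [Nat.cast_zero] at hkey
      rw [hkey]
      by_cases hw0 : w = 0
      · subst hw0; rw [if_pos rfl, if_pos (by norm_num)]
      · rw [if_neg hw0, if_neg (by exact_mod_cast hw0),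
            PySem.List.pyGetD_eq_getElem _ (-1) (by positivity)
              (by simp only [List.length_replicate]; omega)]
        simp
  | succ k ih =>
    obtain ⟨ihlen, ihpt⟩ := ih
    obtain ⟨rlen, rpt⟩ := aRound_spec prices (dpIter prices t k) t ht ihlen
    constructor
    · simp only [dpIter]; rw [rlen]; exact ihlen
    · intro w hw
      show PySem.List.pyGetD (aRound prices t (dpIter prices t k)) (w : Int) (-1) = _
      rw [rpt w]
      by_cases hw0 : w = 0
      · subst hw0
        rw [if_neg (by omega)]
        have h0 := ihpt 0 (by exact_mod_cast ht)
        rw [h0]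
        cases k <;> simp [bCost]
      · rw [if_pos ⟨by omega, hw⟩]
        have hwne : ¬ ((w : Int) = 0) := by exact_mod_cast hw0
        show pcell prices (dpIter prices t k) (w : Int) (w : Int) = bCost prices (k + 1) (w : Int)
        rw [show bCost prices (k + 1) (w : Int)
              = (PySem.List.pyRange 1 ((w : Int) + 1) 1).foldl
                  (fun best p =>
                    let price := PySem.List.pyGetD prices (p - 1) 0
                    if price ≠ -1 then
                      let sub := bCost prices k ((w : Int) - p)
                      if sub ≠ -1 then
                        let tt := sub + price
                        if best = -1 then tt else min best tt
                      else best
                    else best)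
                  (bCost prices k (w : Int)) from by rw [bCost, if_neg hwne]]
        rw [pcell, ihpt w hw]
        apply (PySem.List.foldl_congr_mem _ _ _ _ ?_).symm
        intro acc p hp
        rw [PySem.List.mem_pyRange_one] at hp
        have hnn : 0 ≤ (w : Int) - p := by omega
        have hle : (w : Int) - p ≤ t := by omega
        have hcast : (((((w : Int) - p).toNat : Nat)) : Int) = (w : Int) - p :=
          Int.toNat_of_nonneg hnn
        apply bstep_eq_cstep
        rw [← hcast, ihpt ((w : Int) - p).toNat (by omega)]

-- A's fold over range(1, n+1) is the n-fold iteration dpIter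
lemma foldA_eq_dpIter (prices : List Int) (t : Int) : ∀ n : Nat,
    (PySem.List.pyRange 1 ((n : Int) + 1) 1).foldl (fun dp _ => aRound prices t dp) (dp0 t)
      = dpIter prices t n := by
  intro n
  induction n with
  | zero =>
    simp only [Nat.cast_zero, zero_add]
    rw [PySem.List.pyRange_one_eq_nil le_rfl]
    rfl
  | succ n ih =>
    rw [show (((n + 1 : Nat)) : Int) + 1 = ((n : Int) + 1) + 1 from by push_cast; ring,
        PySem.List.pyRange_one_succ_right (show (1 : Int) ≤ (n : Int) + 1 from by omega),
        List.foldl_append, ih]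
    rfl

-- ===== VERDICT (by name: the statement is the Claim_ definition above) =====
theorem find_min_cost_spec : Claim_equal_find_min_cost := by
  intro m t prices _dom hpre
  obtain ⟨ht, _hlen⟩ := hpre
  unfold Spec_find_min_cost find_min_cost find_min_cost_alt
  have hrange : PySem.List.pyRange 1 (m + 1) 1 = PySem.List.pyRange 1 ((m.toNat : Int) + 1) 1 := by
    by_cases hm : 0 ≤ m
    · rw [Int.toNat_of_nonneg hm]
    · rw [PySem.List.pyRange_one_eq_nil (by omega),
          PySem.List.pyRange_one_eq_nil (by omega)]
  rw [hrange]
  show PySem.List.pyGetD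
      ((PySem.List.pyRange 1 ((m.toNat : Int) + 1) 1).foldl
        (fun dp _ => aRound prices t dp) (dp0 t)) t (-1) = _
  rw [foldA_eq_dpIter prices t m.toNat]
  obtain ⟨_, hpt⟩ := dpIter_eq_bCost prices t ht m.toNat
  have hcast : ((t.toNat : Nat) : Int) = t := Int.toNat_of_nonneg ht
  calc PySem.List.pyGetD (dpIter prices t m.toNat) t (-1)
      = PySem.List.pyGetD (dpIter prices t m.toNat) ((t.toNat : Nat) : Int) (-1) := by rw [hcast]
    _ = bCost prices m.toNat ((t.toNat : Nat) : Int) := hpt t.toNat (by omega)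
    _ = bCost prices m.toNat t := by rw [hcast]
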